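-- pv_equiv track=rewrite | github.com/kokluosman/FingerPrintMinutiae | FingerPrintMinutiae/py/FPM.py | postprocessing_minutiae_list_diff_type
-- ===== SOURCE A (Python) =====
-- def manhattan_distance(x, y):
--     (x1,x2)=x
--     (y1,y2)=y
--     return abs(x1 - y1) + abs(x2 - y2)
--
-- def postprocessing_minutiae_list_diff_type(minutiaeList1, minutiaeList2, tresh = 8, dist = manhattan_distance):
--     res = minutiaeList1.copy()
--     res = res + minutiaeList2
--     for m1 in minutiaeList1:
--         for m2 in minutiaeList2:
--             if dist(m1, m2) < tresh:
--                 if m1 in res: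
--                     res.remove(m1)
--                 if m2 in res:
--                     res.remove(m2)
--     return res
-- ===== SOURCE B (Python) =====
-- def manhattan_distance(x, y):
--     (x1, x2) = x
--     (y1, y2) = y
--     return abs(x1 - y1) + abs(x2 - y2)
--
-- def postprocessing_minutiae_list_diff_type(minutiaeList1, minutiaeList2, tresh = 8, dist = manhattan_distance):
--     # Count how many removal attempts each value receives, then drop that many
--     # earliest occurrences in a single pass over the concatenation.
--     attempts = {}
--     for m1 in minutiaeList1:
--         for m2 in minutiaeList2:
--             if dist(m1, m2) < tresh:
--                 attempts[m1] = attempts.get(m1, 0) + 1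
--                 attempts[m2] = attempts.get(m2, 0) + 1
--     res = []
--     for m in minutiaeList1 + minutiaeList2:
--         a = attempts.get(m, 0)
--         if a > 0:
--             attempts[m] = a - 1
--         else:
--             res.append(m)
--     return res
-- ===== Notes on version B (the rewrite author's own statement) =====
-- stated objective: faster
-- what changed: Instead of mutating the concatenated list with repeated linear in/remove scans per close pair, B counts removal attempts per value in a dict and then drops that many earliest occurrences in one pass over the concatenation.
import Mathlib
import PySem

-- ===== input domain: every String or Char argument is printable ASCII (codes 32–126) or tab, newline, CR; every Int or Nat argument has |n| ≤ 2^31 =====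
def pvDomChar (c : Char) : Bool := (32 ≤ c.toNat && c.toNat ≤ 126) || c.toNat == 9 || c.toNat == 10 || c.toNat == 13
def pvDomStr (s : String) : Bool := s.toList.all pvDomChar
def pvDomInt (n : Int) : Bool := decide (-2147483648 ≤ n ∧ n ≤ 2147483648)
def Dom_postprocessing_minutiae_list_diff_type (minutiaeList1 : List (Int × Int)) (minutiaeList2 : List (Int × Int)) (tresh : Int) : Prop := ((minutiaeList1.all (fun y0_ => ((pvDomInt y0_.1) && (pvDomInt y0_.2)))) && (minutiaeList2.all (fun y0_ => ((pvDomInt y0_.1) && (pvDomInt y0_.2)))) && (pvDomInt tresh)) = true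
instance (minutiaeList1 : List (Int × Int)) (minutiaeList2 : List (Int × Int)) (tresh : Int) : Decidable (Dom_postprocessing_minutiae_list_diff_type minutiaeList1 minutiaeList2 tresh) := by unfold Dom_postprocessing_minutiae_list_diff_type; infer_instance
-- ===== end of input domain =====

-- B replaces A's repeated in/remove scans over the mutated result list by counting
-- removal attempts per value once (O(n*m)) and dropping that many earliest
-- occurrences in a single pass; objective: faster (asymptotic).

-- ===== PORT A =====
def pvManhattan (x y : Int × Int) : Int := |x.1 - y.1| + |x.2 - y.2|

-- Python's 'if m in res: res.remove(m)'
def pvRemIf (res : List (Int × Int)) (m : Int × Int) : List (Int × Int) :=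
  if res.contains m then (PySem.List.remove? res m).getD res else res

def postprocessing_minutiae_list_diff_type (minutiaeList1 : List (Int × Int)) (minutiaeList2 : List (Int × Int)) (tresh : Int) : List (Int × Int) :=
  List.foldl (fun res m1 =>
    List.foldl (fun res m2 =>
      if pvManhattan m1 m2 < tresh then pvRemIf (pvRemIf res m1) m2 else res)
      res minutiaeList2)
    (minutiaeList1 ++ minutiaeList2) minutiaeList1

-- ===== PORT B =====
def postprocessing_minutiae_list_diff_type_alt (minutiaeList1 : List (Int × Int)) (minutiaeList2 : List (Int × Int)) (tresh : Int) : List (Int × Int) :=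
  let attempts : PySem.Dict (Int × Int) Int :=
    List.foldl (fun d m1 =>
      List.foldl (fun d m2 =>
        if pvManhattan m1 m2 < tresh then
          (fun d1 => d1.insert m2 (d1.getD m2 0 + 1)) (d.insert m1 (d.getD m1 0 + 1))
        else d)
        d minutiaeList2)
      PySem.Dict.empty minutiaeList1
  (List.foldl (fun (st : List (Int × Int) × PySem.Dict (Int × Int) Int) m =>
      let a := st.2.getD m 0
      if a > 0 then (st.1, st.2.insert m (a - 1)) else (st.1 ++ [m], st.2))
    ([], attempts) (minutiaeList1 ++ minutiaeList2)).1

-- ===== PRECONDITION & SPEC =====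
def Spec_postprocessing_minutiae_list_diff_type (minutiaeList1 : List (Int × Int)) (minutiaeList2 : List (Int × Int)) (tresh : Int) (out : List (Int × Int)) : Prop := out = postprocessing_minutiae_list_diff_type_alt minutiaeList1 minutiaeList2 tresh
instance (minutiaeList1 : List (Int × Int)) (minutiaeList2 : List (Int × Int)) (tresh : Int) (out : List (Int × Int)) : Decidable (Spec_postprocessing_minutiae_list_diff_type minutiaeList1 minutiaeList2 tresh out) := by unfold Spec_postprocessing_minutiae_list_diff_type; infer_instance

-- ===== CLAIM (what is proved, stated in full; the proofs are below) =====
def Claim_equal_postprocessing_minutiae_list_diff_type : Prop := ∀ (minutiaeList1 : List (Int × Int)) (minutiaeList2 : List (Int × Int)) (tresh : Int), Dom_postprocessing_minutiae_list_diff_type minutiaeList1 minutiaeList2 tresh → Spec_postprocessing_minutiae_list_diff_type minutiaeList1 minutiaeList2 tresh (postprocessing_minutiae_list_diff_type minutiaeList1 minutiaeList2 tresh)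

-- ===== LEMMAS AND PROOFS =====

-- Drop, per value v, the first (f v) occurrences of v (one pass, left to right).
def pvDropF : List (Int × Int) → ((Int × Int) → Int) → List (Int × Int)
  | [], _ => []
  | x :: xs, f =>
    if f x > 0 then pvDropF xs (fun y => if y = x then f x - 1 else f y)
    else x :: pvDropF xs f

-- The flat sequence of removal attempts A performs.
def pvSeq (l1 l2 : List (Int × Int)) (t : Int) : List (Int × Int) :=
  l1.flatMap (fun m1 => l2.flatMap (fun m2 => if pvManhattan m1 m2 < t then [m1, m2] else []))

theorem pvNestedInner {σ : Type} (g : σ → (Int × Int) → σ) (t : Int) (m1 : Int × Int) :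
    ∀ (l2 : List (Int × Int)) (s : σ),
      List.foldl (fun s m2 => if pvManhattan m1 m2 < t then g (g s m1) m2 else s) s l2
        = List.foldl g s (l2.flatMap (fun m2 => if pvManhattan m1 m2 < t then [m1, m2] else [])) := by
  intro l2
  induction l2 with
  | nil => intro s; rfl
  | cons m2 rest ih =>
    intro s
    by_cases h : pvManhattan m1 m2 < t
    · simp [h, ih]
    · simp [h, ih]

theorem pvNested {σ : Type} (g : σ → (Int × Int) → σ) (t : Int) :
    ∀ (l1 : List (Int × Int)) (l2 : List (Int × Int)) (s : σ),
      List.foldl (fun s m1 =>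
        List.foldl (fun s m2 => if pvManhattan m1 m2 < t then g (g s m1) m2 else s) s l2) s l1
        = List.foldl g s (pvSeq l1 l2 t) := by
  intro l1
  induction l1 with
  | nil => intro l2 s; rfl
  | cons m1 rest ih =>
    intro l2 s
    simp only [List.foldl_cons, pvSeq, List.flatMap_cons, List.foldl_append]
    rw [pvNestedInner g t m1 l2 s]
    exact ih l2 _

theorem pvRemIf_eq_erase (res : List (Int × Int)) (m : Int × Int) :
    pvRemIf res m = res.erase m := by
  unfold pvRemIf
  by_cases h : m ∈ res
  · simp [h, PySem.List.remove?_eq_some_erase res m h]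
  · have hc : res.contains m = false := by simpa using h
    rw [if_neg (by simpa using h)]
    exact (List.erase_of_not_mem h).symm

theorem pvDropF_const_zero : ∀ (l : List (Int × Int)), pvDropF l (fun _ => 0) = l := by
  intro l
  induction l with
  | nil => rfl
  | cons x xs ih => simp [pvDropF, ih]

theorem pvDropF_inc :
    ∀ (l : List (Int × Int)) (f : (Int × Int) → Int) (x : Int × Int),
      (∀ v, 0 ≤ f v) →
      pvDropF l (fun y => if y = x then f x + 1 else f y) = pvDropF (l.erase x) f := by
  intro l
  induction l with
  | nil => intro f x _; rfl
  | cons y ys ih =>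
    intro f x hf
    by_cases hyx : y = x
    · subst hyx
      have hpos : f y + 1 > 0 := by have := hf y; omega
      simp only [pvDropF, List.erase_cons_head]
      simp only [if_true]
      rw [if_pos hpos]
      have hfun : (fun z => if z = y then f y + 1 - 1 else (if z = y then f y + 1 else f z)) = f := by
        funext z; by_cases hz : z = y <;> simp [hz]
      rw [hfun]
    · have herase : (y :: ys).erase x = y :: ys.erase x :=
        List.erase_cons_tail (by simpa using hyx)
      rw [herase]
      simp only [pvDropF]
      rw [if_neg hyx]
      by_cases hy : f y > 0
      · rw [if_pos hy, if_pos hy]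
        have hg : ∀ v, 0 ≤ (fun w : Int × Int => if w = y then f y - 1 else f w) v := by
          intro v; by_cases hv : v = y <;> simp [hv] <;> [omega; exact hf v]
        have hfun : (fun z => if z = y then f y - 1 else (if z = x then f x + 1 else f z))
            = (fun z => if z = x then (if x = y then f y - 1 else f x) + 1
                        else (if z = y then f y - 1 else f z)) := by
          funext z
          by_cases hzy : z = y
          · subst hzy; simp [hyx]
          · by_cases hzx : z = x <;> simp [hzy, hzx, Ne.symm hyx]
        rw [hfun]
        exact ih (fun w => if w = y then f y - 1 else f w) x hg
      · rw [if_neg hy, if_neg hy]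
        rw [ih f x hf]

theorem pvFoldlErase :
    ∀ (s : List (Int × Int)) (l : List (Int × Int)),
      List.foldl (fun r v => r.erase v) l s = pvDropF l (fun v => (s.count v : Int)) := by
  intro s
  induction s with
  | nil =>
    intro l
    simp only [List.foldl_nil, List.count_nil]
    exact (pvDropF_const_zero l).symm
  | cons x rest ih =>
    intro l
    have hfun : (fun y => if y = x then ((rest.count x : Int)) + 1 else (rest.count y : Int))
        = (fun v => ((x :: rest).count v : Int)) := by
      funext v
      by_cases hv : v = x
      · subst hv; simp
      · simp [List.count_cons, hv]
        intro h; exact absurd h.symm hv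
    calc List.foldl (fun r v => r.erase v) l (x :: rest)
        = List.foldl (fun r v => r.erase v) (l.erase x) rest := rfl
      _ = pvDropF (l.erase x) (fun v => (rest.count v : Int)) := ih _
      _ = pvDropF l (fun y => if y = x then ((rest.count x : Int)) + 1 else (rest.count y : Int)) :=
          (pvDropF_inc l _ x (fun v => Int.natCast_nonneg _)).symm
      _ = pvDropF l (fun v => ((x :: rest).count v : Int)) := by rw [hfun]

theorem pvPass :
    ∀ (l : List (Int × Int)) (d : PySem.Dict (Int × Int) Int) (acc : List (Int × Int)),
      (List.foldl (fun (st : List (Int × Int) × PySem.Dict (Int × Int) Int) m =>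
          let a := st.2.getD m 0
          if a > 0 then (st.1, st.2.insert m (a - 1)) else (st.1 ++ [m], st.2))
        (acc, d) l).1 = acc ++ pvDropF l (fun v => d.getD v 0) := by
  intro l
  induction l with
  | nil => intro d acc; simp [pvDropF]
  | cons x xs ih =>
    intro d acc
    by_cases h : 0 < d.getD x 0
    · have hfun : (fun v => (d.insert x (d.getD x 0 - 1)).getD v 0)
          = (fun y => if y = x then d.getD x 0 - 1 else d.getD y 0) := by
        funext v; simp [PySem.Dict.getD_insert]
      simp only [List.foldl_cons, h, if_true, pvDropF]
      rw [ih, hfun]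
    · simp only [List.foldl_cons, h, if_false, pvDropF]
      rw [ih]
      simp

theorem pvA_eq_dropF (l1 l2 : List (Int × Int)) (t : Int) :
    postprocessing_minutiae_list_diff_type l1 l2 t
      = pvDropF (l1 ++ l2) (fun v => ((pvSeq l1 l2 t).count v : Int)) := by
  unfold postprocessing_minutiae_list_diff_type
  have h1 : (fun (res : List (Int × Int)) m1 =>
      List.foldl (fun res m2 => if pvManhattan m1 m2 < t then pvRemIf (pvRemIf res m1) m2 else res) res l2)
      = (fun (res : List (Int × Int)) m1 =>
      List.foldl (fun res m2 => if pvManhattan m1 m2 < t then ((res.erase m1).erase m2) else res) res l2) := by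
    funext res m1
    congr 1
    funext res m2
    by_cases h : pvManhattan m1 m2 < t <;> simp [h, pvRemIf_eq_erase]
  rw [h1, pvNested (fun r v => r.erase v) t l1 l2 (l1 ++ l2), pvFoldlErase]

theorem pvAttempts_eq (l1 l2 : List (Int × Int)) (t : Int) (v : Int × Int) :
    (List.foldl (fun (d : PySem.Dict (Int × Int) Int) m1 =>
      List.foldl (fun d m2 =>
        if pvManhattan m1 m2 < t then
          (fun d1 => d1.insert m2 (d1.getD m2 0 + 1)) (d.insert m1 (d.getD m1 0 + 1))
        else d) d l2) PySem.Dict.empty l1).getD v 0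
      = ((pvSeq l1 l2 t).count v : Int) := by
  rw [pvNested (fun (d : PySem.Dict (Int × Int) Int) m => d.insert m (d.getD m 0 + 1)) t l1 l2]
  rw [PySem.Dict.getD_foldl_insert_add_one]
  simp

-- ===== VERDICT (by name: the statement is the Claim_ definition above) =====
theorem postprocessing_minutiae_list_diff_type_spec : Claim_equal_postprocessing_minutiae_list_diff_type := by
  intro l1 l2 t _
  unfold Spec_postprocessing_minutiae_list_diff_type postprocessing_minutiae_list_diff_type_alt
  rw [pvA_eq_dropF, pvPass]
  have hfun : (fun v => (List.foldl (fun (d : PySem.Dict (Int × Int) Int) m1 =>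
      List.foldl (fun d m2 =>
        if pvManhattan m1 m2 < t then
          (fun d1 => d1.insert m2 (d1.getD m2 0 + 1)) (d.insert m1 (d.getD m1 0 + 1))
        else d) d l2) PySem.Dict.empty l1).getD v 0)
      = (fun v => ((pvSeq l1 l2 t).count v : Int)) := by
    funext v; exact pvAttempts_eq l1 l2 t v
  rw [hfun]
  simp
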